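-- pv_equiv track=rewrite | github.com/FindDefinition/ccimport | ccimport/source_iter.py | find_list_str_prefix
-- ===== SOURCE A (Python) =====
-- from bisect import bisect_left, bisect_right
-- from typing import Dict, List, Tuple
--
-- def find_list_str_prefix(data: List[str], prefix: str, full_match=False):
--     hi = len(data)
--     if not hi:
--         return
--     left = bisect_left(data, prefix, 0, hi)
--     if left == hi:
--         return
--     for i in range(left, len(data)):
--         string = data[i]
--         if full_match:
--             should_break = string != prefix
--         else:
--             should_break = not string.startswith(prefix)
--         if should_break:
--             break
--         yield i
-- ===== SOURCE B (Python) =====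
-- from bisect import bisect_left
--
--
-- def find_list_str_prefix(data, prefix, full_match=False):
--     # Recursive decomposition: recurse on the suffix of the list after the
--     # bisect point, consuming one element per call, instead of an indexed
--     # for-loop with break.  (A does not require `data` to be sorted, so the
--     # end of the matching run must be discovered element by element.)
--     def emit(rest, i):
--         if rest:
--             s = rest[0]
--             if (s == prefix) if full_match else s.startswith(prefix):
--                 yield i
--                 yield from emit(rest[1:], i + 1)
--
--     left = bisect_left(data, prefix)
--     yield from emit(data[left:], left)
-- ===== Notes on version B (the rewrite author's own statement) =====
-- stated objective: alternative
-- what changed: A is an indexed for-loop over range(left, len(data)) with a computed should_break flag, a break, and two early-return guards; B drops the guards and the index loop and instead recurses structurally on the list suffix data[left:], emitting an index per recursive call while the match predicate holds (a binary-searched right bound is impossible because A never requires data to be sorted).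
import Mathlib
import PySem

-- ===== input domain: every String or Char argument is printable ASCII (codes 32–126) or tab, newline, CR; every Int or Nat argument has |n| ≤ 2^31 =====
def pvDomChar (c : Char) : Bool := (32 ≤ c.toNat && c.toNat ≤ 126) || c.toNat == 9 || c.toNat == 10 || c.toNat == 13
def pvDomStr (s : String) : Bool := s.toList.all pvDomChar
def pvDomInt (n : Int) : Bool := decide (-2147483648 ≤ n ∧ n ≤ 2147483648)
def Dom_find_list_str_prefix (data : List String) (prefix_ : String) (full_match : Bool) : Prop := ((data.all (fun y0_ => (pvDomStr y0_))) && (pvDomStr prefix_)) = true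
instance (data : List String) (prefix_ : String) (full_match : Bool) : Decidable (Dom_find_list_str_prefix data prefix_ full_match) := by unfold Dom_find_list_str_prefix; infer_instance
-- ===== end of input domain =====

-- B replaces A's indexed for-loop with break and its two early-return guards by structural
-- recursion on the list suffix data[left:]; objective: alternative decomposition, same cost.
-- Shared helper: both Pythons call bisect.bisect_left; ported once, as CPython's while-loop
-- (fuel = hi - lo bounds the iteration count; each step shrinks hi - lo, so fuel never runs out).
def pyBisectLeftAux (data : List String) (x : String) : Nat → Nat → Nat → Nat
  | 0, lo, _ => lo
  | fuel + 1, lo, hi =>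
    if lo < hi then
      let mid := (lo + hi) / 2
      if data.getD mid "" < x then pyBisectLeftAux data x fuel (mid + 1) hi
      else pyBisectLeftAux data x fuel lo mid
    else lo

def pyBisectLeft (data : List String) (x : String) (lo hi : Nat) : Nat :=
  pyBisectLeftAux data x (hi - lo) lo hi

-- ===== PORT A =====
-- A's for-loop from `left`: yield i while the string matches, break at the first mismatch
-- (fuel = number of remaining indices, data.length - i).
def pvScanA (data : List String) (prefix_ : String) (full_match : Bool) : Nat → Nat → List Int
  | 0, _ => []
  | fuel + 1, i =>
    if i < data.length then
      let string := data.getD i ""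
      let should_break : Bool := if full_match then string != prefix_
                                 else !(PySem.Str.startswith string prefix_)
      if should_break then []
      else (i : Int) :: pvScanA data prefix_ full_match fuel (i + 1)
    else []

def find_list_str_prefix (data : List String) (prefix_ : String) (full_match : Bool) : List Int :=
  let hi := data.length
  if hi = 0 then []
  else
    let left := pyBisectLeft data prefix_ 0 hi
    if left = hi then []
    else pvScanA data prefix_ full_match (data.length - left) left

-- ===== PORT B =====
-- B's recursive generator `emit(rest, i)`: structural recursion on the list suffix,
-- one element consumed (rest[1:]) and one index yielded per call while the match holds.
def pvEmit (prefix_ : String) (full_match : Bool) : List String → Nat → List Int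
  | [], _ => []
  | s :: rest, i =>
    if (if full_match then s == prefix_ else PySem.Str.startswith s prefix_) then
      (i : Int) :: pvEmit prefix_ full_match rest (i + 1)
    else []

def find_list_str_prefix_alt (data : List String) (prefix_ : String) (full_match : Bool) : List Int :=
  let left := pyBisectLeft data prefix_ 0 data.length
  pvEmit prefix_ full_match (data.drop left) left

-- ===== PRECONDITION & SPEC =====
def Spec_find_list_str_prefix (data : List String) (prefix_ : String) (full_match : Bool) (out : List Int) : Prop := out = find_list_str_prefix_alt data prefix_ full_match
instance (data : List String) (prefix_ : String) (full_match : Bool) (out : List Int) : Decidable (Spec_find_list_str_prefix data prefix_ full_match out) := by unfold Spec_find_list_str_prefix; infer_instance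

-- ===== CLAIM (what is proved, stated in full; the proofs are below) =====
def Claim_equal_find_list_str_prefix : Prop := ∀ (data : List String) (prefix_ : String) (full_match : Bool), Dom_find_list_str_prefix data prefix_ full_match → Spec_find_list_str_prefix data prefix_ full_match (find_list_str_prefix data prefix_ full_match)

-- ===== LEMMAS AND PROOFS =====

theorem pyBisectLeftAux_le (data : List String) (x : String) (fuel lo hi : Nat)
    (h : lo ≤ hi) : pyBisectLeftAux data x fuel lo hi ≤ hi := by
  induction fuel generalizing lo hi with
  | zero => exact h
  | succ fuel ih =>
    rw [pyBisectLeftAux]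
    dsimp only
    split
    · split
      · exact ih _ _ (by omega)
      · exact le_trans (ih _ _ (by omega)) (by omega)
    · exact h

-- A's fuel-indexed scan from index i equals B's structural recursion on the suffix data.drop i,
-- provided the fuel covers the remaining indices.
theorem pvScanA_eq_pvEmit (data : List String) (prefix_ : String) (full_match : Bool)
    (fuel i : Nat) (hf : data.length ≤ i + fuel) :
    pvScanA data prefix_ full_match fuel i
      = pvEmit prefix_ full_match (data.drop i) i := by
  induction fuel generalizing i with
  | zero =>
    have : data.drop i = [] := List.drop_eq_nil_of_le (by omega)
    rw [pvScanA, this, pvEmit]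
  | succ fuel ih =>
    rw [pvScanA]
    by_cases h : i < data.length
    · obtain ⟨s, hs⟩ : ∃ s, data[i]? = some s := by
        exact ⟨data[i], List.getElem?_eq_getElem h⟩
      have hdrop : data.drop i = s :: data.drop (i + 1) := by
        rw [List.drop_eq_getElem_cons h]
        simp [List.getElem?_eq_getElem h] at hs
        rw [hs]
      have hgetD : data.getD i "" = s := by
        simp [List.getD, hs]
      rw [if_pos h, hdrop, pvEmit, hgetD]
      by_cases hpred : (if full_match then (s == prefix_)
                        else PySem.Str.startswith s prefix_) = true
      · have hnb : (if full_match then (s != prefix_)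
                    else !(PySem.Str.startswith s prefix_)) = false := by
          cases full_match <;> simp_all
        simp only [hnb, Bool.false_eq_true, if_false, if_pos hpred]
        rw [ih (i + 1) (by omega)]
      · have hb : (if full_match then (s != prefix_)
                   else !(PySem.Str.startswith s prefix_)) = true := by
          cases full_match <;> simp_all
        simp only [hb, if_true, if_neg hpred]
    · have : data.drop i = [] := List.drop_eq_nil_of_le (by omega)
      rw [if_neg h, this, pvEmit]

-- ===== VERDICT (by name: the statement is the Claim_ definition above) =====
theorem find_list_str_prefix_spec : Claim_equal_find_list_str_prefix := by
  intro data prefix_ full_match _hDom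
  unfold Spec_find_list_str_prefix find_list_str_prefix find_list_str_prefix_alt
  by_cases h0 : data.length = 0
  · have hbl : pyBisectLeft data prefix_ 0 0 = 0 := by
      unfold pyBisectLeft; rw [pyBisectLeftAux]
    have hnil : data = [] := List.length_eq_zero_iff.mp h0
    simp [hnil, pvEmit]
  · simp only [h0, ite_false]
    have hble : pyBisectLeft data prefix_ 0 data.length ≤ data.length :=
      pyBisectLeftAux_le data prefix_ _ 0 data.length (Nat.zero_le _)
    by_cases hleft : pyBisectLeft data prefix_ 0 data.length = data.length
    · have hdrop : data.drop (pyBisectLeft data prefix_ 0 data.length) = [] :=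
        List.drop_eq_nil_of_le (by omega)
      simp only [hleft, ite_true]
      rw [← hleft, hdrop, pvEmit]
    · simp only [hleft, ite_false]
      exact pvScanA_eq_pvEmit data prefix_ full_match _ _ (by omega)
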